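-- pv_equiv track=rewrite | github.com/OleksiiLozovyi/learn_repo | weekend2_3.py | caps_lock
-- ===== SOURCE A (Python) =====
-- def caps_lock(string):
--     res_string = ''
--     caps_flag = False
--     for char in string:
--         if char == 'a':
--             caps_flag = not caps_flag
--             continue
--         if caps_flag:
--             res_string += char.upper()
--         else:
--             res_string += char
--     return res_string
-- ===== SOURCE B (Python) =====
-- def caps_lock(string):
--     return ''.join(seg.upper() if i % 2 else seg
--                    for i, seg in enumerate(string.split('a')))
-- ===== Notes on version B (the rewrite author's own statement) =====
-- stated objective: idiomatic
-- what changed: Replaces the character-by-character flag-toggling loop with quadratic string concatenation by one split on the delimiter plus a single join that uppercases exactly the odd-indexed segments.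
import Mathlib
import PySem

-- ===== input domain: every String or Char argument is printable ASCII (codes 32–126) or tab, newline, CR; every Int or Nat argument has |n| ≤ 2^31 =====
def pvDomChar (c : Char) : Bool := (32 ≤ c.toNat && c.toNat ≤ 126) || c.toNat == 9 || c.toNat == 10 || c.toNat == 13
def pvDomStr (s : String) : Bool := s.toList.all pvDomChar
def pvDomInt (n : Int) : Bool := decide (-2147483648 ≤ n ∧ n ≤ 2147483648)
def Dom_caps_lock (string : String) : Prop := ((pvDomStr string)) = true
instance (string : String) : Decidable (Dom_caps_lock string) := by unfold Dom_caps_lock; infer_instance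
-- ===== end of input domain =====

-- B replaces A's per-character flag-toggling loop by one split on 'a' plus a join
-- that uppercases the odd-indexed segments (objective: idiomatic).


-- ===== PORT A =====
-- for char in string: toggle on 'a', else append (upper-cased when the flag is set)
def caps_lock (string : String) : String :=
  String.ofList
    ((string.toList.foldl
      (fun (st : List Char × Bool) (c : Char) =>
        if c = 'a' then (st.1, !st.2)
        else if st.2 then (st.1 ++ [PySem.Chars.upperChar c], st.2)
        else (st.1 ++ [c], st.2))
      ([], false)).1)

-- ===== PORT B =====
-- ''.join(seg.upper() if i % 2 else seg for i, seg in enumerate(string.split('a')))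
def caps_lock_alt (string : String) : String :=
  String.ofList
    (PySem.Chars.join []
      ((PySem.List.enumerate (string.toList.splitOn 'a')).map
        (fun p => if p.1 % 2 = 1 then PySem.Chars.upper p.2 else p.2)))

-- ===== PRECONDITION & SPEC =====
def Spec_caps_lock (string : String) (out : String) : Prop := out = caps_lock_alt string
instance (string : String) (out : String) : Decidable (Spec_caps_lock string out) := by unfold Spec_caps_lock; infer_instance

-- ===== CLAIM (what is proved, stated in full; the proofs are below) =====
def Claim_equal_caps_lock : Prop := ∀ (string : String), Dom_caps_lock string → Spec_caps_lock string (caps_lock string)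

-- ===== LEMMAS AND PROOFS =====

-- A's loop as a structural recursion on the characters, flag as parameter
def fA : List Char → Bool → List Char
  | [], _ => []
  | c :: cs, b =>
    if c = 'a' then fA cs (!b)
    else (if b then PySem.Chars.upperChar c else c) :: fA cs b

-- B's alternating join as a structural recursion on the segments
def gB : List (List Char) → Bool → List Char
  | [], _ => []
  | s :: ss, b => (if b then PySem.Chars.upper s else s) ++ gB ss (!b)

theorem foldl_eq_fA (cs : List Char) (acc : List Char) (b : Bool) :
    (cs.foldl
      (fun (st : List Char × Bool) (c : Char) =>
        if c = 'a' then (st.1, !st.2)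
        else if st.2 then (st.1 ++ [PySem.Chars.upperChar c], st.2)
        else (st.1 ++ [c], st.2))
      (acc, b)).1 = acc ++ fA cs b := by
  induction cs generalizing acc b with
  | nil => simp [fA]
  | cons c cs ih =>
    by_cases h : c = 'a'
    · simp [List.foldl, h, fA, ih]
    · by_cases hb : b <;> simp [List.foldl, h, hb, fA, ih]

theorem splitOnP_ne_nil (p : Char → Bool) (cs : List Char) :
    cs.splitOnP p ≠ [] := by
  induction cs with
  | nil => simp [List.splitOnP_nil]
  | cons c cs ih =>
    rw [List.splitOnP_cons]
    split
    · simp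
    · cases h : cs.splitOnP p with
      | nil => exact absurd h ih
      | cons s ss => simp

theorem gB_splitOnP_eq_fA (cs : List Char) (b : Bool) :
    gB (cs.splitOnP (· == 'a')) b = fA cs b := by
  induction cs generalizing b with
  | nil => cases b <;> simp [List.splitOnP_nil, gB, fA, PySem.Chars.upper]
  | cons c cs ih =>
    rw [List.splitOnP_cons]
    by_cases h : c = 'a'
    · simp [h, gB, fA, ih, PySem.Chars.upper]
    · cases hs : cs.splitOnP (· == 'a') with
      | nil => exact absurd hs (splitOnP_ne_nil _ cs)
      | cons s ss =>
        have := ih b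
        rw [hs] at this
        cases b <;> simp_all [gB, fA, PySem.Chars.upper]

theorem join_empty_sep (parts : List (List Char)) :
    PySem.Chars.join [] parts = parts.flatten := by
  induction parts with
  | nil => simp [PySem.Chars.join, List.intercalate]
  | cons s ss ih =>
    cases ss with
    | nil => simp [PySem.Chars.join, List.intercalate]
    | cons t ts =>
      rw [List.flatten_cons, ← ih]
      simp [PySem.Chars.join, List.intercalate, List.intersperse]

theorem enum_map_eq_gB (ss : List (List Char)) (k : Int) (hk : 0 ≤ k) :
    PySem.Chars.join []
      ((PySem.List.enumerate ss k).map
        (fun p => if p.1 % 2 = 1 then PySem.Chars.upper p.2 else p.2))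
      = gB ss (decide (k % 2 = 1)) := by
  induction ss generalizing k with
  | nil => simp [PySem.List.enumerate_nil, gB]
  | cons s ss ih =>
    rw [PySem.List.enumerate_cons]
    have hk1 : (0:Int) ≤ k + 1 := by omega
    have hpar : decide ((k + 1) % 2 = 1) = !decide (k % 2 = 1) := by
      by_cases h : k % 2 = 1 <;> simp only [h, decide_true, decide_false, Bool.not_true, Bool.not_false, decide_eq_true_eq, decide_eq_false_iff_not] <;> omega
    have ihk := ih (k + 1) hk1
    rw [hpar] at ihk
    rw [join_empty_sep] at ihk ⊢
    by_cases h : k % 2 = 1 <;> simp [h, gB, ihk]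

-- ===== VERDICT (by name: the statement is the Claim_ definition above) =====
theorem caps_lock_spec : Claim_equal_caps_lock := by
  intro s _
  unfold Spec_caps_lock caps_lock caps_lock_alt
  rw [foldl_eq_fA, List.nil_append]
  rw [show s.toList.splitOn 'a' = s.toList.splitOnP (· == 'a') from rfl,
    enum_map_eq_gB _ 0 (by norm_num), gB_splitOnP_eq_fA]
  simp
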